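-- pv_equiv track=rewrite | github.com/ereinha/SYMBA | SYMBA_HEP/SYMBAHEP_Transformers_Abdulhakim_Alnuqaydan+Marco_Knipfer/data-generation-marty/QED/QED_loop_insertions_parallel.py | get_possible_n_to_m_all_orderings
-- ===== SOURCE A (Python) =====
-- from itertools import combinations_with_replacement, product, permutations, combinations
--
-- def get_possible_n_to_m_all_orderings(particles_list, n, m):
--     """
--     All thinkable n->m processes where the whole ordering matters
--     e.g. (in_electron, in_electron, out_electron, out_electron, out_photon)
--          (in_electron, in_electron, out_electron, out_photon, out_electron)
--          (in_electron, in_electron, out_photon, out_electron, out_electron)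
--          (in_electron, out_photon, in_electron, out_electron, out_electron)
--          ...
--     """
--     in_list = ["in_"+p for p in particles_list]
--     out_list = ["out_"+p for p in particles_list]
--
--     possible_n_in = combinations_with_replacement(in_list, n)
--     possible_m_out = combinations_with_replacement(out_list, m)
--     possible_n_to_m = product(possible_n_in, possible_m_out)
--     possible_n_to_m = [permutations(x) for x in possible_n_to_m]
--     possible_n_to_m = [element for sublist in possible_n_to_m for element in sublist]   # flatten list
--     possible_n_to_m = [sum(p, ()) for p in possible_n_to_m]
--     # possible_n_to_m = [particles_format(p) for p in possible_n_to_m]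
--
--     return possible_n_to_m
-- ===== SOURCE B (Python) =====
-- def _multisets(tokens, k):
--     # Size-k multisets of tokens in lexicographic order, enumerated by count
--     # vectors (stars and bars): choose how many copies of the first token
--     # (largest count first), recurse on the remaining tokens.
--     if not tokens:
--         return [[]] if k == 0 else []
--     head, rest = tokens[0], tokens[1:]
--     result = []
--     for c in reversed(range(k + 1)):
--         for tail in _multisets(rest, k - c):
--             result.append([head] * c + tail)
--     return result
--
-- def get_possible_n_to_m_all_orderings(particles_list, n, m):
--     ins = _multisets(["in_" + p for p in particles_list], n)
--     outs = _multisets(["out_" + p for p in particles_list], m)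
--     result = []
--     for nin in ins:
--         fwd = [tuple(nin + mout) for mout in outs]
--         bwd = [tuple(mout + nin) for mout in outs]
--         for a, b in zip(fwd, bwd):
--             result.append(a)
--             result.append(b)
--     return result
-- ===== Notes on version B (the rewrite author's own statement) =====
-- stated objective: alternative
-- what changed: Replaced itertools combinations_with_replacement + product + permutations + flatten + sum(p,()) with a recursive stars-and-bars enumeration (count vectors: how many copies of the first token, largest count first, then recurse) of each multiset, and pairing by zipping the two precomputed order lists nin+mout and mout+nin.
import Mathlib
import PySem

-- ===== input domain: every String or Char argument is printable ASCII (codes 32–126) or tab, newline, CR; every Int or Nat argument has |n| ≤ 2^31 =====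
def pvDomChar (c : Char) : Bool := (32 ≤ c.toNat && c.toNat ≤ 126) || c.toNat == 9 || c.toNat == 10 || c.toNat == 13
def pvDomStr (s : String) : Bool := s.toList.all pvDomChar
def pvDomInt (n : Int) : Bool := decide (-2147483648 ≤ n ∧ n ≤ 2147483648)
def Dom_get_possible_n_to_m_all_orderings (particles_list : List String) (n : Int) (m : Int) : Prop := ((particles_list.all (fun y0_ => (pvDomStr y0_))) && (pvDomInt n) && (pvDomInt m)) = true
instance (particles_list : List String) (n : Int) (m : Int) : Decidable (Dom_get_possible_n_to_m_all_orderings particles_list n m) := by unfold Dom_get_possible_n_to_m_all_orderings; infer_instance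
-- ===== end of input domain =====

-- B replaces A's itertools pipeline (combinations_with_replacement / product /
-- permutations / flatten / sum) by a recursive stars-and-bars (count-vector)
-- enumeration of each multiset and a zip-interleave of the two order lists
-- (objective: alternative).

-- itertools.combinations_with_replacement, exact (lexicographic by position, r ≥ 0)
def pvCWR (xs : List String) (k : Nat) : List (List String) :=
  match k, xs with
  | 0, _ => [[]]
  | _ + 1, [] => []
  | k + 1, x :: rest => ((pvCWR (x :: rest) k).map (fun t => x :: t)) ++ pvCWR rest (k + 1)
termination_by (k, xs.length)

-- ===== PORT A =====
def get_possible_n_to_m_all_orderings (particles_list : List String) (n : Int) (m : Int) : List (List String) :=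
  let in_list := particles_list.map (fun p => "in_" ++ p)
  let out_list := particles_list.map (fun p => "out_" ++ p)
  let possible_n_in := pvCWR in_list n.toNat
  let possible_m_out := pvCWR out_list m.toNat
  -- product(possible_n_in, possible_m_out)
  let possible_n_to_m := possible_n_in.flatMap (fun i => possible_m_out.map (fun o => (i, o)))
  -- [permutations(x) for x in …]: permutations of a 2-tuple, exact
  let perms := possible_n_to_m.map (fun x => [(x.1, x.2), (x.2, x.1)])
  -- flatten, then sum(p, ()) concatenates the two blocks
  (perms.flatten).map (fun p => p.1 ++ p.2)

-- ===== PORT B =====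
-- _multisets: stars-and-bars count-vector recursion (reversed(range(k+1)) = descending counts)
def pvMultisets (tokens : List String) (k : Int) : List (List String) :=
  match tokens with
  | [] => if k == 0 then [[]] else []
  | head :: rest =>
    ((List.range (k + 1).toNat).reverse).flatMap
      (fun (c : Nat) => (pvMultisets rest (k - (c : Int))).map (fun tail => List.replicate c head ++ tail))

def get_possible_n_to_m_all_orderings_alt (particles_list : List String) (n : Int) (m : Int) : List (List String) :=
  let ins := pvMultisets (particles_list.map (fun p => "in_" ++ p)) n
  let outs := pvMultisets (particles_list.map (fun p => "out_" ++ p)) m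
  ins.foldl
    (fun acc nin =>
      let fwd := outs.map (fun mout => nin ++ mout)
      let bwd := outs.map (fun mout => mout ++ nin)
      (fwd.zip bwd).foldl (fun acc2 ab => acc2 ++ [ab.1, ab.2]) acc)
    []

-- ===== PRECONDITION & SPEC =====
-- Python A raises ValueError ("r must be non-negative") when n < 0 or m < 0.
def Pre_get_possible_n_to_m_all_orderings (particles_list : List String) (n : Int) (m : Int) : Prop :=
  0 ≤ n ∧ 0 ≤ m
instance (particles_list : List String) (n : Int) (m : Int) : Decidable (Pre_get_possible_n_to_m_all_orderings particles_list n m) := by unfold Pre_get_possible_n_to_m_all_orderings; infer_instance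

def pvWitness_get_possible_n_to_m_all_orderings : List String × Int × Int := (["e", "p"], 2, 1)

def Spec_get_possible_n_to_m_all_orderings (particles_list : List String) (n : Int) (m : Int) (out : List (List String)) : Prop := out = get_possible_n_to_m_all_orderings_alt particles_list n m
instance (particles_list : List String) (n : Int) (m : Int) (out : List (List String)) : Decidable (Spec_get_possible_n_to_m_all_orderings particles_list n m out) := by unfold Spec_get_possible_n_to_m_all_orderings; infer_instance

-- ===== CLAIM (what is proved, stated in full; the proofs are below) =====
def Claim_equal_get_possible_n_to_m_all_orderings : Prop := ∀ (particles_list : List String) (n : Int) (m : Int), Dom_get_possible_n_to_m_all_orderings particles_list n m → Pre_get_possible_n_to_m_all_orderings particles_list n m → Spec_get_possible_n_to_m_all_orderings particles_list n m (get_possible_n_to_m_all_orderings particles_list n m)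


-- ===== LEMMAS AND PROOFS =====

-- One row of A's pipeline: the pair block for a fixed ins-combination.
theorem pv_inner (a : List String) (L2 : List (List String)) :
    ((L2.map (fun o => (a, o))).map
        (fun x => [(x.1, x.2), (x.2, x.1)])).flatten.map (fun p => p.1 ++ p.2)
      = L2.flatMap (fun mout => [a ++ mout, mout ++ a]) := by
  induction L2 with
  | nil => rfl
  | cons b u ih =>
    simp only [List.map_cons, List.flatten_cons, List.map_append, List.flatMap_cons, ih]
    rfl

-- The A-side pipeline (product, permutations of the pair, flatten, concatenate) as a flatMap.
theorem pv_pipe (L1 L2 : List (List String)) :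
    ((L1.flatMap (fun i => L2.map (fun o => (i, o)))).map
        (fun x => [(x.1, x.2), (x.2, x.1)])).flatten.map (fun p => p.1 ++ p.2)
      = L1.flatMap (fun nin => L2.flatMap (fun mout => [nin ++ mout, mout ++ nin])) := by
  induction L1 with
  | nil => rfl
  | cons a t ih =>
    simp only [List.flatMap_cons, List.map_append, List.flatten_append]
    rw [← ih]
    congr 1
    exact pv_inner a L2

-- pvCWR on a cons, expressed by count of the head element (stars and bars view).
theorem pv_cwr_counts (x : String) (rest : List String) (k : Nat) :
    pvCWR (x :: rest) k
      = ((List.range (k + 1)).reverse).flatMap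
          (fun c => (pvCWR rest (k - c)).map (fun tail => List.replicate c x ++ tail)) := by
  induction k with
  | zero => simp [pvCWR, List.range_succ]
  | succ k ih =>
    rw [pvCWR, ih]
    have h2 : (List.range (k + 1 + 1)).reverse
        = ((List.range (k + 1)).reverse.map (· + 1)) ++ [0] := by
      rw [List.range_succ_eq_map]
      simp [List.map_reverse]
    rw [h2, List.flatMap_append, List.flatMap_map, List.map_flatMap]
    congr 1
    · apply List.flatMap_congr
      intro c _
      simp [List.map_map, Function.comp, List.replicate_succ, Nat.add_sub_add_right]
    · simp

-- pvMultisets at a non-negative integer computes pvCWR.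
theorem pv_multisets_eq_cwr (tokens : List String) (k : Nat) :
    pvMultisets tokens (k : Int) = pvCWR tokens k := by
  induction tokens generalizing k with
  | nil =>
    cases k with
    | zero => simp [pvMultisets, pvCWR]
    | succ k =>
      have hne : ((k : Int) + 1) ≠ 0 := by omega
      simp [pvMultisets, pvCWR, hne]
  | cons x rest ih =>
    rw [pvMultisets, pv_cwr_counts]
    have ht : ((k : Int) + 1).toNat = k + 1 := by omega
    rw [ht]
    apply List.flatMap_congr
    intro c hc
    have hck : c ≤ k := by
      have := List.mem_reverse.mp hc
      have := List.mem_range.mp this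
      omega
    have : (k : Int) - (c : Int) = ((k - c : Nat) : Int) := by omega
    rw [this, ih]

-- B's nested loop as the canonical flatMap.
theorem pv_loop (L1 L2 : List (List String)) :
    L1.foldl (fun acc nin =>
      let fwd := L2.map (fun mout => nin ++ mout)
      let bwd := L2.map (fun mout => mout ++ nin)
      (fwd.zip bwd).foldl (fun acc2 ab => acc2 ++ [ab.1, ab.2]) acc) []
      = L1.flatMap (fun nin => L2.flatMap (fun mout => [nin ++ mout, mout ++ nin])) := by
  have h := PySem.List.foldl_append_eq_flatMap
    (fun nin => L2.flatMap (fun mout => [nin ++ mout, mout ++ nin])) L1 ([])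
  simp only [List.nil_append] at h
  rw [← h]
  apply List.foldl_ext
  intro acc nin _
  simp only [List.zip_map']
  have h2 := PySem.List.foldl_append_eq_flatMap
    (fun (ab : List String × List String) => [ab.1, ab.2])
    (L2.map (fun mout => (nin ++ mout, mout ++ nin))) acc
  rw [h2, List.flatMap_map]

-- ===== VERDICT (by name: the statement is the Claim_ definition above) =====
theorem get_possible_n_to_m_all_orderings_spec : Claim_equal_get_possible_n_to_m_all_orderings := by
  intro particles_list n m _ hpre
  unfold Spec_get_possible_n_to_m_all_orderings
  unfold get_possible_n_to_m_all_orderings get_possible_n_to_m_all_orderings_alt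
  obtain ⟨hn, hm⟩ := hpre
  have en : n = ((n.toNat : Nat) : Int) := by omega
  have em : m = ((m.toNat : Nat) : Int) := by omega
  simp only [pv_pipe, pv_loop]
  rw [en, em, pv_multisets_eq_cwr, pv_multisets_eq_cwr]
  simp only [Int.toNat_natCast]
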